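-- pv_equiv track=rewrite | github.com/eroge-69/PyToExe | python-files/Рассчет длины ряда стеллажа.py | format_beam_combination
-- ===== SOURCE A (Python) =====
-- from collections import Counter
--
-- def format_beam_combination(beams_combo):
--     """
--     Форматирует комбинацию балок в удобочитаемый вид
--     Пример: [2700, 2700, 2700, 1800, 1800] → "2700(3) + 1800(2)"
--     """
--     counter = Counter(beams_combo)
--     sorted_beams = sorted(counter.items(), key=lambda x: x[0], reverse=True)
--
--     formatted_parts = []
--     for beam, count in sorted_beams:
--         if count == 1:
--             formatted_parts.append(f"{beam}")
--         else:
--             formatted_parts.append(f"{beam}({count})")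
--
--     return " + ".join(formatted_parts)
-- ===== SOURCE B (Python) =====
-- def format_beam_combination(beams_combo):
--     """
--     Форматирует комбинацию балок в удобочитаемый вид
--     Пример: [2700, 2700, 2700, 1800, 1800] → "2700(3) + 1800(2)"
--     """
--     ordered = sorted(beams_combo, reverse=True)
--     parts = []
--     cur = 0
--     count = 0
--     for x in ordered:
--         if count and x == cur:
--             count += 1
--         else:
--             if count:
--                 parts.append(f"{cur}" if count == 1 else f"{cur}({count})")
--             cur = x
--             count = 1
--     if count:
--         parts.append(f"{cur}" if count == 1 else f"{cur}({count})")
--     return " + ".join(parts)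
-- ===== Notes on version B (the rewrite author's own statement) =====
-- stated objective: faster
-- what changed: Replaces the Counter frequency table plus sort of distinct key-count pairs by a single descending sort of the whole list followed by one run-length pass that emits each run as it ends.
import Mathlib
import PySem

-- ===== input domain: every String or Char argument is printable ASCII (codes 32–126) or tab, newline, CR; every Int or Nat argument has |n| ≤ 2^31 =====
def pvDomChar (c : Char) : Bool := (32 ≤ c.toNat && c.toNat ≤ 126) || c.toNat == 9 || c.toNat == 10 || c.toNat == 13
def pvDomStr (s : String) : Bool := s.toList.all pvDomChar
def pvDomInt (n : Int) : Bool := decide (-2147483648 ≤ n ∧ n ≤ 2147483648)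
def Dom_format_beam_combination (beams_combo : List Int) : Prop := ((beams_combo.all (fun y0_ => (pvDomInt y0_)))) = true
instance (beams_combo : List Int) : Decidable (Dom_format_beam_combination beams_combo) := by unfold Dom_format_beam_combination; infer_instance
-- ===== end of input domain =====

-- B replaces the Counter + sort-of-distinct-key-count-pairs by one descending sort of
-- the whole list followed by a single run-length pass (measured faster by a constant factor).

-- ===== PORT A =====
-- counter = Counter(beams_combo); sorted_beams = sorted(counter.items(), key=fst, reverse=True);
-- loop appending "beam" or "beam(count)"; " + ".join
def format_beam_combination (beams_combo : List Int) : String :=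
  PySem.Str.join " + "
    ((PySem.List.sorted (PySem.Dict.counter beams_combo).items (fun x => x.1) true).foldl
      (fun acc p =>
        acc ++ [if p.2 == 1 then PySem.Int.toStr p.1
                else PySem.Int.toStr p.1 ++ "(" ++ PySem.Int.toStr p.2 ++ ")"]) [])

-- ===== PORT B =====
-- one step of B's for-loop: state = (parts, cur, count); count = 0 encodes "no open run"
def fbcStep (st : List String × Int × Int) (x : Int) : List String × Int × Int :=
  let (parts, cur, count) := st
  if count != 0 && x == cur then (parts, cur, count + 1)
  else ((if count != 0 then
           parts ++ [if count == 1 then PySem.Int.toStr cur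
                     else PySem.Int.toStr cur ++ "(" ++ PySem.Int.toStr count ++ ")"]
         else parts), x, 1)

-- the trailing 'if count: parts.append(...)' after the loop
def fbcFinish (st : List String × Int × Int) : List String :=
  let (parts, cur, count) := st
  if count != 0 then
    parts ++ [if count == 1 then PySem.Int.toStr cur
              else PySem.Int.toStr cur ++ "(" ++ PySem.Int.toStr count ++ ")"]
  else parts

def format_beam_combination_alt (beams_combo : List Int) : String :=
  PySem.Str.join " + "
    (fbcFinish ((PySem.List.sorted beams_combo (fun x => x) true).foldl fbcStep ([], 0, 0)))

-- ===== PRECONDITION & SPEC =====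
def Spec_format_beam_combination (beams_combo : List Int) (out : String) : Prop := out = format_beam_combination_alt beams_combo
instance (beams_combo : List Int) (out : String) : Decidable (Spec_format_beam_combination beams_combo out) := by unfold Spec_format_beam_combination; infer_instance

-- ===== CLAIM (what is proved, stated in full; the proofs are below) =====
def Claim_equal_format_beam_combination : Prop := ∀ (beams_combo : List Int), Dom_format_beam_combination beams_combo → Spec_format_beam_combination beams_combo (format_beam_combination beams_combo)

-- ===== LEMMAS AND PROOFS =====

-- the common formatting of one (beam, count) pair
def fbcFmt (p : Int × Int) : String :=
  if p.2 == 1 then PySem.Int.toStr p.1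
  else PySem.Int.toStr p.1 ++ "(" ++ PySem.Int.toStr p.2 ++ ")"

-- run-length encoding with a pending run (cur = c, open count = k)
def fbcRleAux (c : Int) (k : Int) : List Int → List (Int × Int)
  | [] => [(c, k)]
  | x :: t => if x = c then fbcRleAux c (k + 1) t else (c, k) :: fbcRleAux x 1 t

theorem fbcFold_eq (ys : List Int) : ∀ (parts : List String) (c k : Int), 1 ≤ k →
    fbcFinish (ys.foldl fbcStep (parts, c, k)) = parts ++ (fbcRleAux c k ys).map fbcFmt := by
  induction ys with
  | nil =>
      intro parts c k hk
      simp only [List.foldl_nil, fbcFinish, fbcRleAux, List.map]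
      have : (k != 0) = true := by simp; omega
      simp [this, fbcFmt]
  | cons x t ih =>
      intro parts c k hk
      by_cases hx : x = c
      · have hk0 : (k != 0) = true := by simp; omega
        have hxc : (x == c) = true := by simp [hx]
        simp only [List.foldl_cons, fbcStep, hk0, hxc, Bool.and_self, if_true]
        rw [ih parts c (k + 1) (by omega)]
        simp [fbcRleAux, hx]
      · have hxc : (x == c) = false := by simp [hx]
        have hk0 : (k != 0) = true := by simp; omega
        simp only [List.foldl_cons, fbcStep, hxc, hk0, Bool.and_false, Bool.false_eq_true,
          if_false, if_true]
        rw [ih _ x 1 le_rfl]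
        simp [fbcRleAux, hx, fbcFmt]

-- membership characterisation of the run-length encoding on a descending list
theorem fbcRleAux_mem (ys : List Int) : ∀ (c k : Int) (p : Int × Int),
    (∀ y ∈ ys, y ≤ c) → ys.Pairwise (fun a b => b ≤ a) →
    (p ∈ fbcRleAux c k ys ↔ p = (c, k + (ys.count c : Int)) ∨
      (p.1 ∈ ys ∧ p.1 ≠ c ∧ p.2 = (ys.count p.1 : Int))) := by
  induction ys with
  | nil => intro c k p _ _; simp [fbcRleAux]
  | cons x t ih =>
      intro c k p hle hpw
      have hpwt : t.Pairwise (fun a b => b ≤ a) := hpw.of_cons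
      have hlex : ∀ y ∈ t, y ≤ x := by
        intro y hy; exact (List.pairwise_cons.mp hpw).1 y hy
      by_cases hx : x = c
      · subst hx
        have hlet : ∀ y ∈ t, y ≤ x := hlex
        rw [show fbcRleAux x k (x :: t) = fbcRleAux x (k + 1) t by simp [fbcRleAux]]
        rw [ih x (k + 1) p hlet hpwt]
        constructor
        · rintro (h | ⟨h1, h2, h3⟩)
          · left; rw [h]; simp [List.count_cons]; omega
          · right
            refine ⟨List.mem_cons_of_mem _ h1, h2, ?_⟩
            rw [h3]; simp [Ne.symm h2]
        · rintro (h | ⟨h1, h2, h3⟩)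
          · left; rw [h]; simp [List.count_cons]; omega
          · right
            have h1' : p.1 ∈ t := by
              rcases List.mem_cons.mp h1 with h | h
              · exact absurd h h2
              · exact h
            refine ⟨h1', h2, ?_⟩
            rw [h3]; simp [Ne.symm h2]
      · have hxc : x < c := lt_of_le_of_ne (hle x List.mem_cons_self) hx
        have hcnot : c ∉ x :: t := by
          intro hc
          rcases List.mem_cons.mp hc with h | h
          · exact absurd h.symm hx
          · exact absurd (hlex c h) (not_le.mpr hxc)
        have hcount0 : ((x :: t).count c : Int) = 0 := by
          simp [List.count_eq_zero_of_not_mem hcnot]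
        rw [show fbcRleAux c k (x :: t) = (c, k) :: fbcRleAux x 1 t by simp [fbcRleAux, hx]]
        rw [List.mem_cons, ih x 1 p hlex hpwt]
        constructor
        · rintro (h | h | ⟨h1, h2, h3⟩)
          · left; rw [h, hcount0]; simp
          · right
            refine ⟨by rw [h]; exact List.mem_cons_self, ?_, ?_⟩
            · rw [h]; exact hx
            · rw [h]; simp [List.count_cons]; omega
          · have hp1x : p.1 ≠ x := h2
            have hp1c : p.1 ≠ c := by
              intro hc; exact absurd (hlex p.1 (hc ▸ h1)) (not_le.mpr (hc ▸ hxc))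
            right
            refine ⟨List.mem_cons_of_mem _ h1, hp1c, ?_⟩
            rw [h3]; simp [Ne.symm hp1x]
        · rintro (h | ⟨h1, h2, h3⟩)
          · left; rw [h, hcount0]; simp
          · rcases List.mem_cons.mp h1 with hpx | hpt
            · right; left
              exact Prod.ext hpx (by rw [h3, hpx]; simp [List.count_cons]; omega)
            · by_cases hpx : p.1 = x
              · right; left
                exact Prod.ext hpx (by rw [h3, hpx]; simp [List.count_cons]; omega)
              · right; right
                refine ⟨hpt, hpx, ?_⟩
                rw [h3]; simp [Ne.symm hpx]

-- keys of the run-length encoding are strictly decreasing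
theorem fbcRleAux_pairwise (ys : List Int) : ∀ (c k : Int),
    (∀ y ∈ ys, y ≤ c) → ys.Pairwise (fun a b => b ≤ a) →
    (fbcRleAux c k ys).Pairwise (fun a b => b.1 < a.1) := by
  induction ys with
  | nil => intro c k _ _; simp [fbcRleAux]
  | cons x t ih =>
      intro c k hle hpw
      have hpwt : t.Pairwise (fun a b => b ≤ a) := hpw.of_cons
      have hlex : ∀ y ∈ t, y ≤ x := fun y hy => (List.pairwise_cons.mp hpw).1 y hy
      by_cases hx : x = c
      · subst hx
        rw [show fbcRleAux x k (x :: t) = fbcRleAux x (k + 1) t by simp [fbcRleAux]]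
        exact ih x (k + 1) hlex hpwt
      · have hxc : x < c := lt_of_le_of_ne (hle x List.mem_cons_self) hx
        rw [show fbcRleAux c k (x :: t) = (c, k) :: fbcRleAux x 1 t by simp [fbcRleAux, hx]]
        refine List.pairwise_cons.mpr ⟨?_, ih x 1 hlex hpwt⟩
        intro p hp
        rcases (fbcRleAux_mem t x 1 p hlex hpwt).mp hp with h | ⟨h1, _, _⟩
        · rw [h]; exact hxc
        · exact lt_of_le_of_lt (hlex p.1 h1) hxc

-- A's sorted counter items coincide with B's run-length encoding of the sorted list
theorem fbc_sorted_items_eq_rle (xs : List Int) (x : Int) (t : List Int)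
    (hs : PySem.List.sorted xs (fun x => x) true = x :: t) :
    PySem.List.sorted (PySem.Dict.counter xs).items (fun p => p.1) true = fbcRleAux x 1 t := by
  have hperm : (x :: t).Perm xs := hs ▸ PySem.List.sorted_perm xs (fun x => x) true
  have hpw : (x :: t).Pairwise (fun a b => b ≤ a) := by
    have := PySem.List.sorted_pairwise_rev xs (fun x => x)
    rw [hs] at this; exact this
  have hpwt : t.Pairwise (fun a b => b ≤ a) := hpw.of_cons
  have hlex : ∀ y ∈ t, y ≤ x := fun y hy => (List.pairwise_cons.mp hpw).1 y hy
  have hpair : (fbcRleAux x 1 t).Pairwise (fun a b => b.1 < a.1) :=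
    fbcRleAux_pairwise t x 1 hlex hpwt
  have hmem : ∀ p : Int × Int, p ∈ fbcRleAux x 1 t ↔
      (p.1 ∈ xs ∧ p.2 = (xs.count p.1 : Int)) := by
    intro p
    rw [fbcRleAux_mem t x 1 p hlex hpwt]
    have hcnt : ∀ v : Int, (x :: t).count v = xs.count v := fun v => hperm.count_eq v
    have hmemx : ∀ v : Int, v ∈ (x :: t) ↔ v ∈ xs := fun v =>
      ⟨fun h => hperm.mem_iff.mp h, fun h => hperm.mem_iff.mpr h⟩
    constructor
    · rintro (h | ⟨h1, h2, h3⟩)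
      · rw [h]
        refine ⟨(hmemx x).mp List.mem_cons_self, ?_⟩
        rw [← hcnt x]; simp [List.count_cons]; omega
      · refine ⟨(hmemx p.1).mp (List.mem_cons_of_mem _ h1), ?_⟩
        rw [h3, show t.count p.1 = (x :: t).count p.1 by
          simp [List.count_cons, Ne.symm h2], hcnt]
    · rintro ⟨h1, h2⟩
      by_cases hpx : p.1 = x
      · left
        refine Prod.ext hpx ?_
        rw [h2, hpx, ← hcnt x]; simp [List.count_cons]; omega
      · right
        have hpt : p.1 ∈ t := by
          rcases List.mem_cons.mp ((hmemx p.1).mpr h1) with h | h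
          · exact absurd h hpx
          · exact h
        refine ⟨hpt, hpx, ?_⟩
        rw [h2, ← hcnt]; simp [Ne.symm hpx]
  have hitems : (PySem.Dict.counter xs).items =
      (PySem.Set.ofList xs).map (fun k => (k, (xs.count k : Int))) :=
    PySem.Dict.items_counter xs
  have hnodupRle : (fbcRleAux x 1 t).Nodup :=
    hpair.imp (fun {a b} h => by intro he; rw [he] at h; exact lt_irrefl _ h)
  have hnodupItems : ((PySem.Set.ofList xs).map (fun k => (k, (xs.count k : Int)))).Nodup := by
    refine (PySem.Set.nodup_ofList xs).map ?_
    intro a b hab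
    exact congrArg Prod.fst hab
  have hpermItems : (fbcRleAux x 1 t).Perm
      ((PySem.Set.ofList xs).map (fun k => (k, (xs.count k : Int)))) := by
    rw [List.perm_ext_iff_of_nodup hnodupRle hnodupItems]
    intro p
    rw [hmem p]
    simp only [List.mem_map]
    constructor
    · rintro ⟨h1, h2⟩
      exact ⟨p.1, (PySem.Set.mem_ofList xs p.1).mpr h1, Prod.ext rfl h2.symm⟩
    · rintro ⟨k, hk, hkp⟩
      cases hkp
      exact ⟨(PySem.Set.mem_ofList xs k).mp hk, rfl⟩
  rw [hitems]
  exact PySem.List.sorted_rev_eq_of_perm_of_pairwise_gt _ _ _ hpermItems hpair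

-- ===== VERDICT (by name: the statement is the Claim_ definition above) =====
theorem format_beam_combination_spec : Claim_equal_format_beam_combination := by
  intro xs _
  unfold Spec_format_beam_combination format_beam_combination format_beam_combination_alt
  rcases hs : PySem.List.sorted xs (fun x => x) true with _ | ⟨x, t⟩
  · have hxs : xs = [] := (PySem.List.sorted_eq_nil_iff xs (fun x => x) true).mp hs
    subst hxs
    rfl
  · rw [show (x :: t).foldl fbcStep ([], 0, 0) = t.foldl fbcStep ([], x, 1) by
      simp [List.foldl_cons, fbcStep]]
    rw [fbcFold_eq t [] x 1 le_rfl]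
    rw [fbc_sorted_items_eq_rle xs x t hs]
    rw [PySem.List.foldl_append_singleton_eq_map]
    rfl
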